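-- pv_equiv track=rewrite | github.com/max-baumann/shred | src/shredder.py | _extract_abstract
-- ===== SOURCE A (Python) =====
-- def _extract_abstract(markdown_text):
--     """Heuristic: First 1000 chars or until first Header."""
--     lines = markdown_text.split('\n')
--     abstract_lines = []
--     for line in lines:
--         if line.startswith('#'):
--             break
--         abstract_lines.append(line)
--
--     abstract = "\n".join(abstract_lines).strip()
--     if not abstract:
--          # Fallback if article starts with header immediately
--          return markdown_text[:1000]
--     return abstract[:2000] # Cap it
-- ===== SOURCE B (Python) =====
-- def _extract_abstract(markdown_text):
--     """Heuristic: First 1000 chars or until first Header."""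
--     if markdown_text.startswith('#'):
--         cut = 0
--     else:
--         i = markdown_text.find('\n#')
--         cut = len(markdown_text) if i == -1 else i
--     abstract = markdown_text[:cut].strip()
--     if not abstract:
--         # Fallback if article starts with header immediately
--         return markdown_text[:1000]
--     return abstract[:2000]
-- ===== Notes on version B (the rewrite author's own statement) =====
-- stated objective: simpler
-- what changed: Replaces the split-into-lines + accumulate-until-header loop with a single search for the first header boundary (a leading hash, or the first newline-followed-by-hash occurrence) and one prefix slice; the line list and the append loop disappear.
import Mathlib
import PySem

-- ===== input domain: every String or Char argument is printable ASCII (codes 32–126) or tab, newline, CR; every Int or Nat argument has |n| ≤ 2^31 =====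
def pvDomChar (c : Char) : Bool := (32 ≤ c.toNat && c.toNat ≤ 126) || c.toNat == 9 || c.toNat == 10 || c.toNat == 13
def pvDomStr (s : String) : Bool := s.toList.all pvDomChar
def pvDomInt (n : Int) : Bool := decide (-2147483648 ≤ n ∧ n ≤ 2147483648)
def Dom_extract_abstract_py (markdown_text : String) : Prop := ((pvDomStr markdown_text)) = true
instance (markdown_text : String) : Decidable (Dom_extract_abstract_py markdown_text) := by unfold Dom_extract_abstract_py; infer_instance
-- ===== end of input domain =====

-- B replaces A's split-into-lines + accumulate loop with a single header-boundary search and one prefix slice (same cost, simpler).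

-- ===== PORT A =====
-- the for-loop with break: collect lines until the first one starting with '#'
def pvCollect : List (List Char) → List (List Char)
  | [] => []
  | l :: ls => if PySem.Chars.startswith l ['#'] then [] else l :: pvCollect ls

def extract_abstract_py (markdown_text : String) : String :=
  let cs := markdown_text.toList
  let lines := PySem.Chars.splitOn cs ['\n']
  let abstract_lines := pvCollect lines
  let abstract := PySem.Chars.strip (PySem.Chars.join ['\n'] abstract_lines)
  if abstract = [] then String.ofList (PySem.Chars.slice cs none (some 1000))
  else String.ofList (PySem.Chars.slice abstract none (some 2000))

-- ===== PORT B =====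
def extract_abstract_py_alt (markdown_text : String) : String :=
  let cs := markdown_text.toList
  let cut : Int :=
    if PySem.Chars.startswith cs ['#'] then 0
    else
      let i := PySem.Chars.find cs ['\n', '#']
      if i = -1 then (cs.length : Int) else i
  let abstract := PySem.Chars.strip (PySem.Chars.slice cs none (some cut))
  if abstract = [] then String.ofList (PySem.Chars.slice cs none (some 1000))
  else String.ofList (PySem.Chars.slice abstract none (some 2000))

-- ===== PRECONDITION & SPEC =====
def Spec_extract_abstract_py (markdown_text : String) (out : String) : Prop := out = extract_abstract_py_alt markdown_text
instance (markdown_text : String) (out : String) : Decidable (Spec_extract_abstract_py markdown_text out) := by unfold Spec_extract_abstract_py; infer_instance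

-- ===== CLAIM (what is proved, stated in full; the proofs are below) =====
def Claim_equal_extract_abstract_py : Prop := ∀ (markdown_text : String), Dom_extract_abstract_py markdown_text → Spec_extract_abstract_py markdown_text (extract_abstract_py markdown_text)

-- ===== LEMMAS AND PROOFS =====

-- structural description of splitOn on separator '\n': (first line, remaining lines)
def pvSplitC : List Char → List Char × List (List Char)
  | [] => ([], [])
  | c :: t =>
    let p := pvSplitC t
    if c = '\n' then ([], p.1 :: p.2) else (c :: p.1, p.2)

-- prefix of cs up to (excluding) the first '\n' that is followed by '#'
def pvHdr : List Char → List Char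
  | [] => []
  | c :: t => if c = '\n' ∧ PySem.Chars.startswith t ['#'] then [] else c :: pvHdr t

theorem pvSplitC_go (l : List Char) : ∀ (fuel : Nat) (cur : List Char) (acc : List (List Char)),
    l.length ≤ fuel →
    PySem.Chars.splitOn.go ['\n'] fuel l cur acc =
      acc.reverse ++ (cur.reverse ++ (pvSplitC l).1) :: (pvSplitC l).2 := by
  induction l with
  | nil =>
    intro fuel cur acc _
    cases fuel <;> simp [PySem.Chars.splitOn.go, pvSplitC]
  | cons c t ih =>
    intro fuel cur acc hf
    cases fuel with
    | zero => simp at hf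
    | succ n =>
      rw [PySem.Chars.splitOn.go]
      by_cases hc : c = '\n'
      · subst hc
        rw [if_pos (by simp [List.isPrefixOf])]
        simp only [List.length_cons, List.length_nil, List.drop_succ_cons, List.drop_zero]
        rw [ih n [] ((cur.reverse) :: acc) (by simpa using hf)]
        simp [pvSplitC]
      · rw [if_neg (by simp [List.isPrefixOf]; exact fun h => hc h.symm)]
        rw [ih n (c :: cur) acc (by simpa using hf)]
        simp [pvSplitC, hc]

theorem pvSplitOn_eq (cs : List Char) :
    PySem.Chars.splitOn cs ['\n'] = (pvSplitC cs).1 :: (pvSplitC cs).2 := by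
  unfold PySem.Chars.splitOn
  rw [pvSplitC_go cs (cs.length + 1) [] [] (by omega)]
  simp

-- the first line never starts with '#' when cs does not
theorem pvSplitC_fst_head (cs : List Char) (h : PySem.Chars.startswith cs ['#'] = false) :
    PySem.Chars.startswith (pvSplitC cs).1 ['#'] = false := by
  cases cs with
  | nil => simp [pvSplitC, PySem.Chars.startswith, List.isPrefixOf]
  | cons c t =>
    by_cases hc : c = '\n'
    · subst hc; simp [pvSplitC, PySem.Chars.startswith, List.isPrefixOf]
    · simp only [pvSplitC, if_neg hc]
      simpa [PySem.Chars.startswith, List.isPrefixOf] using h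

-- join absorbs a leading char of the first piece
theorem pvJoin_cons_char (c : Char) (f : List Char) (L : List (List Char)) :
    PySem.Chars.join ['\n'] ((c :: f) :: L) = c :: PySem.Chars.join ['\n'] (f :: L) := by
  cases L <;> simp [PySem.Chars.join, List.intercalate, List.intersperse]

-- MAIN A-side lemma: join of the collected lines is pvHdr (when no immediate header)
theorem pvJoin_collect (cs : List Char) :
    PySem.Chars.join ['\n'] ((pvSplitC cs).1 :: pvCollect (pvSplitC cs).2) = pvHdr cs := by
  induction cs with
  | nil => decide
  | cons c t ih =>
    by_cases hc : c = '\n'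
    · subst hc
      rw [show pvSplitC ('\n' :: t) = ([], (pvSplitC t).1 :: (pvSplitC t).2) from by
        simp [pvSplitC]]
      by_cases hh : PySem.Chars.startswith (pvSplitC t).1 ['#'] = true
      · -- line after the newline starts with '#': everything stops here
        have ht : PySem.Chars.startswith t ['#'] = true := by
          cases t with
          | nil => simp [pvSplitC, PySem.Chars.startswith, List.isPrefixOf] at hh
          | cons a u =>
            by_cases ha : a = '\n'
            · subst ha; simp [pvSplitC, PySem.Chars.startswith, List.isPrefixOf] at hh
            · simp only [pvSplitC, if_neg ha] at hh
              simpa [PySem.Chars.startswith, List.isPrefixOf] using hh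
        simp [pvCollect, hh, pvHdr, ht, PySem.Chars.join, List.intercalate]
      · have hh' : PySem.Chars.startswith (pvSplitC t).1 ['#'] = false := by
          simpa using hh
        have ht : PySem.Chars.startswith t ['#'] = false := by
          by_contra hcon
          cases t with
          | nil => simp [PySem.Chars.startswith, List.isPrefixOf] at hcon
          | cons a u =>
            have ha : a = '#' := by
              by_contra ha
              simp [PySem.Chars.startswith, List.isPrefixOf] at hcon
              exact ha hcon.symm
            subst ha
            simp [pvSplitC, PySem.Chars.startswith, List.isPrefixOf] at hh'
        rw [pvCollect, if_neg (by simp [hh'])]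
        rw [pvHdr]
        rw [if_neg (by simp [ht])]
        rw [← ih]
        simp [PySem.Chars.join, List.intercalate, List.intersperse]
    · rw [show pvSplitC (c :: t) = (c :: (pvSplitC t).1, (pvSplitC t).2) from by
        simp [pvSplitC, hc]]
      rw [pvHdr, if_neg (by simp [hc]), ← ih, pvJoin_cons_char]

theorem pvCollect_eq (cs : List Char) (h : PySem.Chars.startswith cs ['#'] = false) :
    pvCollect (PySem.Chars.splitOn cs ['\n']) =
      (pvSplitC cs).1 :: pvCollect (pvSplitC cs).2 := by
  rw [pvSplitOn_eq]
  simp [pvCollect, pvSplitC_fst_head cs h]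

-- B-side: not-found case means pvHdr keeps everything
theorem pvHdr_of_not_infix (cs : List Char) (h : ¬ ['\n', '#'] <:+: cs) : pvHdr cs = cs := by
  induction cs with
  | nil => simp [pvHdr]
  | cons c t ih =>
    have h1 : ¬ ['\n', '#'] <+: c :: t := fun hp => h (hp.isInfix)
    have h2 : ¬ ['\n', '#'] <:+: t := fun hi => h (List.infix_cons hi)
    rw [pvHdr, if_neg, ih h2]
    rintro ⟨hc, hs⟩
    subst hc
    rw [PySem.Chars.startswith_iff] at hs
    obtain ⟨u, hu⟩ := hs
    exact h1 ⟨u, by simp [← hu]⟩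

-- B-side: found case, first occurrence at i means pvHdr = take i
theorem pvHdr_of_first (cs : List Char) : ∀ (i : Nat),
    ['\n', '#'] <+: cs.drop i → (∀ j < i, ¬ ['\n', '#'] <+: cs.drop j) →
    pvHdr cs = cs.take i := by
  induction cs with
  | nil =>
    intro i hp _
    simp at hp
  | cons c t ih =>
    intro i hp hmin
    cases i with
    | zero =>
      simp only [List.drop] at hp
      obtain ⟨u, hu⟩ := hp
      have hc : c = '\n' := by
        have := congrArg (fun l => l.head?) hu; simpa using this.symm
      have ht : PySem.Chars.startswith t ['#'] = true := by
        rw [PySem.Chars.startswith_iff]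
        cases t with
        | nil => simp at hu
        | cons a u' =>
          have : a = '#' := by
            have := congrArg (fun l => l[1]?) hu; simpa using this.symm
          refine ⟨u', ?_⟩
          have htail := congrArg List.tail hu
          simp at htail
          simp [this, htail]
      simp [pvHdr, hc, ht]
    | succ k =>
      have h0 : ¬ ['\n', '#'] <+: c :: t := by simpa using hmin 0 (by omega)
      rw [pvHdr, if_neg, List.take_succ_cons]
      · rw [ih k (by simpa using hp) (fun j hj => by simpa using hmin (j+1) (by omega))]
      · rintro ⟨hc, hs⟩
        subst hc
        rw [PySem.Chars.startswith_iff] at hs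
        obtain ⟨u, hu⟩ := hs
        exact h0 ⟨u, by simp [← hu]⟩

-- the common pre-strip prefix equals on both sides
theorem pvPrefix_eq (cs : List Char) :
    PySem.Chars.join ['\n'] (pvCollect (PySem.Chars.splitOn cs ['\n'])) =
      PySem.Chars.slice cs none
        (some (if PySem.Chars.startswith cs ['#'] then 0
               else if PySem.Chars.find cs ['\n', '#'] = -1 then (cs.length : Int)
               else PySem.Chars.find cs ['\n', '#'])) := by
  by_cases h : PySem.Chars.startswith cs ['#'] = true
  · have : pvCollect (PySem.Chars.splitOn cs ['\n']) = [] := by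
      rw [pvSplitOn_eq]
      have : PySem.Chars.startswith (pvSplitC cs).1 ['#'] = true := by
        cases cs with
        | nil => simp [PySem.Chars.startswith, List.isPrefixOf] at h
        | cons a u =>
          have ha : a = '#' := by
            by_contra ha
            simp [PySem.Chars.startswith, List.isPrefixOf] at h
            exact ha h.symm
          subst ha
          simp [pvSplitC, PySem.Chars.startswith, List.isPrefixOf]
      simp [pvCollect, this]
    rw [this, if_pos h]
    have hj : PySem.Chars.join ['\n'] ([] : List (List Char)) = [] := by decide
    rw [hj, PySem.Chars.slice_eq_listSlice,
      show ((0:Int)) = (((0:Nat)) : Int) from rfl, PySem.List.slice_to_natCast]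
    simp
  · have h' : PySem.Chars.startswith cs ['#'] = false := by simpa using h
    rw [pvCollect_eq cs h', pvJoin_collect, if_neg (by simp [h'])]
    by_cases hf : PySem.Chars.find cs ['\n', '#'] = -1
    · rw [if_pos hf]
      rw [pvHdr_of_not_infix cs (by rw [← PySem.Chars.find_eq_neg_one_iff]; exact hf)]
      rw [PySem.Chars.slice_eq_listSlice,
        show ((cs.length : Int)) = ((cs.length : Nat) : Int) from rfl,
        PySem.List.slice_to_natCast]
      simp
    · rw [if_neg hf]
      have hpos : 0 ≤ PySem.Chars.find cs ['\n', '#'] := by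
        have := PySem.Chars.neg_one_le_find cs ['\n', '#']
        omega
      obtain ⟨hp, hmin⟩ := PySem.Chars.find_spec (s := cs) (sub := ['\n', '#']) hpos
      rw [pvHdr_of_first cs (PySem.Chars.find cs ['\n', '#']).toNat hp
        (fun j hj => hmin j hj)]
      rw [PySem.Chars.slice_eq_listSlice, PySem.List.slice_to cs hpos]

-- ===== VERDICT (by name: the statement is the Claim_ definition above) =====
theorem extract_abstract_py_spec : Claim_equal_extract_abstract_py := by
  intro s _
  simp only [Spec_extract_abstract_py, extract_abstract_py, extract_abstract_py_alt]
  rw [pvPrefix_eq s.toList]
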